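-- pv_equiv track=rewrite | github.com/arjangvt/recursion_python | max_arr_element_diff.py | max_arr_diff
-- ===== SOURCE A (Python) =====
-- def max_arr_diff(arr ,i ,j ,max):
--
--     if j == len(arr):
--         return max
--
--     if i != j:
--         if max[0] < arr[j]-arr[i]:
--             max[0] = arr[j]-arr[i]
--             max[1] = j
--             max[2] = i
--
--     for i in range(j, len(arr)):
--         max = max_arr_diff(arr, j , i+1 ,max)
--
--     return max
-- ===== SOURCE B (Python) =====
-- # B: direct double loop over the index pairs instead of A's branching recursion.
-- # Like A, updates `max` in place; return value is what is proved.
--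
-- def max_arr_diff(arr, i, j, max):
--     n = len(arr)
--     if j == n:
--         return max
--     if i != j and max[0] < arr[j] - arr[i]:
--         max[0] = arr[j] - arr[i]
--         max[1] = j
--         max[2] = i
--     for p in range(j, n):
--         for q in range(p + 1, n):
--             d = arr[q] - arr[p]
--             if max[0] < d:
--                 max[0] = d
--                 max[1] = q
--                 max[2] = p
--     return max
-- ===== Notes on version B (the rewrite author's own statement) =====
-- stated objective: alternative
-- what changed: A re-explores subproblems in a branching recursion; B scans each index pair exactly once with one direct double loop. Pre_ excludes the inputs where A raises an IndexError and the tie corner where several compared pairs attain the maximal difference above max[0], on which A's stored indices depend on its accidental recursion-visit order.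
-- outside the precondition, e.g. on max_arr_diff([0, 0, 5], 0, 0, [-1, 0, 0]): A returns [5, 2, 1], B returns [5, 2, 0]
import Mathlib
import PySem

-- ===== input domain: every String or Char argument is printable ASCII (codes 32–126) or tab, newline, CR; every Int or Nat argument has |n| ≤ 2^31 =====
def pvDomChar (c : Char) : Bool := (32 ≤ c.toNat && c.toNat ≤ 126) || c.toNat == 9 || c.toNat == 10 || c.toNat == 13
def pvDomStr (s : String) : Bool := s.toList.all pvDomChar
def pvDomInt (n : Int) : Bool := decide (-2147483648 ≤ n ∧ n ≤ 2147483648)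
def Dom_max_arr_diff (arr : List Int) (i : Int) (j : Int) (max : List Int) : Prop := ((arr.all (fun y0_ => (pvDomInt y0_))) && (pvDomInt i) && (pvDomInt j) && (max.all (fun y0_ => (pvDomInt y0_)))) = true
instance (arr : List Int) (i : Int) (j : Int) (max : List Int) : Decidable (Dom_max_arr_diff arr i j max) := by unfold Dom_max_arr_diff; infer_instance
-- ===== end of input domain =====

-- B replaces A's branching, subproblem-re-exploring recursion by one direct double loop over
-- the index pairs (objective: alternative). Like A, the Python B updates the `max` list in
-- place (the same slots); the theorems here are about the return value.

-- ===== PORT A =====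
-- A's recursion; arr[j], arr[i], max[0] are ported with pyGetD (exact under Pre_, which keeps
-- exactly the index/length combinations Python accepts) and the writes max[0]=…,max[1]=…,max[2]=…
-- as List.set.
def max_arr_diff (arr : List Int) (i : Int) (j : Int) (max : List Int) : List Int :=
  if j = (arr.length : Int) then max
  else
    (PySem.List.pyRange j (arr.length : Int) 1).attach.foldl
      (fun m k => max_arr_diff arr j (k.1 + 1) m)
      (if i ≠ j then
        if PySem.List.pyGetD max 0 0 < PySem.List.pyGetD arr j 0 - PySem.List.pyGetD arr i 0 then
          ((max.set 0 (PySem.List.pyGetD arr j 0 - PySem.List.pyGetD arr i 0)).set 1 j).set 2 i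
        else max
      else max)
termination_by ((arr.length : Int) - j).toNat
decreasing_by
  have hk := (PySem.List.mem_pyRange_one).1 k.2
  omega

-- ===== PORT B =====
-- Source B: the root comparison, then `for p in range(j, n): for q in range(p+1, n): …`.
def max_arr_diff_alt (arr : List Int) (i : Int) (j : Int) (max : List Int) : List Int :=
  if j = (arr.length : Int) then max
  else
    (PySem.List.pyRange j (arr.length : Int) 1).foldl
      (fun m p =>
        (PySem.List.pyRange (p + 1) (arr.length : Int) 1).foldl
          (fun m' q =>
            if PySem.List.pyGetD m' 0 0 < PySem.List.pyGetD arr q 0 - PySem.List.pyGetD arr p 0 then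
              ((m'.set 0 (PySem.List.pyGetD arr q 0 - PySem.List.pyGetD arr p 0)).set 1 q).set 2 p
            else m') m)
      (if i ≠ j ∧ PySem.List.pyGetD max 0 0 < PySem.List.pyGetD arr j 0 - PySem.List.pyGetD arr i 0 then
        ((max.set 0 (PySem.List.pyGetD arr j 0 - PySem.List.pyGetD arr i 0)).set 1 j).set 2 i
      else max)

-- ===== PRECONDITION & SPEC =====
-- spec-level helpers for Pre_: the difference arr[q]-arr[p] (Python indexing) and the set of
-- index pairs the function compares: the root pair (i, j) if i ≠ j, and every j ≤ p < q < len(arr).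
def pvDiffAt (arr : List Int) (x : Int × Int) : Int :=
  PySem.List.pyGetD arr x.2 0 - PySem.List.pyGetD arr x.1 0

def pvPairsSpec (arr : List Int) (i : Int) (j : Int) : List (Int × Int) :=
  (if i ≠ j then [(i, j)] else []) ++
    (PySem.List.pyRange j (arr.length : Int) 1).flatMap
      (fun p => (PySem.List.pyRange (p + 1) (arr.length : Int) 1).map (fun q => (p, q)))

-- Pre_ excludes exactly the inputs where A raises an IndexError (a root index outside ±len when the
-- root pair is compared, an empty `max` when any comparison occurs, `max` shorter than 3 slots when
-- an update fires) and the tie corner where several compared pairs attain the maximal difference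
-- above max[0], on which the stored indices depend on A's accidental recursion-visit order.
def Pre_max_arr_diff (arr : List Int) (i : Int) (j : Int) (max : List Int) : Prop :=
  j = (arr.length : Int) ∨
  (i = j ∧ ¬ (j + 1 < (arr.length : Int))) ∨
  (-(arr.length : Int) ≤ j ∧ j < (arr.length : Int) ∧
    (i ≠ j → -(arr.length : Int) ≤ i ∧ i < (arr.length : Int)) ∧
    max ≠ [] ∧
    ((∃ x ∈ pvPairsSpec arr i j, PySem.List.pyGetD max 0 0 < pvDiffAt arr x) →
      3 ≤ max.length ∧
      ∀ x ∈ pvPairsSpec arr i j, ∀ y ∈ pvPairsSpec arr i j,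
        (∀ z ∈ pvPairsSpec arr i j, pvDiffAt arr z ≤ pvDiffAt arr x) →
        (∀ z ∈ pvPairsSpec arr i j, pvDiffAt arr z ≤ pvDiffAt arr y) → x = y))
instance (arr : List Int) (i : Int) (j : Int) (max : List Int) : Decidable (Pre_max_arr_diff arr i j max) := by unfold Pre_max_arr_diff; infer_instance

def pvWitness_max_arr_diff : List Int × Int × Int × List Int := ([1, 5, 2, 9], 0, 0, [-100, 0, 0])

def Spec_max_arr_diff (arr : List Int) (i : Int) (j : Int) (max : List Int) (out : List Int) : Prop := out = max_arr_diff_alt arr i j max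
instance (arr : List Int) (i : Int) (j : Int) (max : List Int) (out : List Int) : Decidable (Spec_max_arr_diff arr i j max out) := by unfold Spec_max_arr_diff; infer_instance

-- ===== CLAIM (what is proved, stated in full; the proofs are below) =====
def Claim_equal_max_arr_diff : Prop := ∀ (arr : List Int) (i : Int) (j : Int) (max : List Int), Dom_max_arr_diff arr i j max → Pre_max_arr_diff arr i j max → Spec_max_arr_diff arr i j max (max_arr_diff arr i j max)

-- ===== LEMMAS AND PROOFS =====

-- one comparison/update step, shared shape of both programs' loop bodies
def pvStep (arr : List Int) (m : List Int) (pq : Int × Int) : List Int :=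
  if PySem.List.pyGetD m 0 0 < PySem.List.pyGetD arr pq.2 0 - PySem.List.pyGetD arr pq.1 0 then
    ((m.set 0 (PySem.List.pyGetD arr pq.2 0 - PySem.List.pyGetD arr pq.1 0)).set 1 pq.2).set 2 pq.1
  else m

def pvGet0 (m : List Int) : Int := PySem.List.pyGetD m 0 0

theorem pvStep_eq (arr : List Int) (m : List Int) (pq : Int × Int) :
    pvStep arr m pq =
      if pvGet0 m < pvDiffAt arr pq then
        ((m.set 0 (pvDiffAt arr pq)).set 1 pq.2).set 2 pq.1
      else m := rfl

theorem pvStep_length (arr : List Int) (m : List Int) (pq : Int × Int) :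
    (pvStep arr m pq).length = m.length := by
  rw [pvStep_eq]; split <;> simp

theorem pvScan_length (arr : List Int) (l : List (Int × Int)) (m : List Int) :
    (l.foldl (pvStep arr) m).length = m.length := by
  induction l generalizing m with
  | nil => rfl
  | cons x t ih => simpa [List.foldl_cons, pvStep_length] using ih (pvStep arr m x)

theorem pvGet0_write (m : List Int) (hm : m ≠ []) (d a b : Int) :
    pvGet0 (((m.set 0 d).set 1 a).set 2 b) = d := by
  cases m with
  | nil => exact absurd rfl hm
  | cons x t => simp [pvGet0, PySem.List.pyGetD_zero]

theorem pvGet0_step_le (arr : List Int) (m : List Int) (pq : Int × Int) :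
    pvGet0 m ≤ pvGet0 (pvStep arr m pq) := by
  rw [pvStep_eq]
  split
  · rcases m with _ | ⟨x, t⟩
    · simp [pvGet0, PySem.List.pyGetD_zero]
    · rw [pvGet0_write _ (by simp)]; omega
  · exact le_refl _

theorem pvDiff_le_step (arr : List Int) (m : List Int) (hm : 1 ≤ m.length) (pq : Int × Int) :
    pvDiffAt arr pq ≤ pvGet0 (pvStep arr m pq) := by
  have hne : m ≠ [] := by cases m <;> simp_all
  rw [pvStep_eq]
  split
  · rw [pvGet0_write _ hne]
  · omega

theorem pvStep_noop (arr : List Int) (m : List Int) (pq : Int × Int)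
    (h : pvDiffAt arr pq ≤ pvGet0 m) : pvStep arr m pq = m := by
  rw [pvStep_eq, if_neg (by omega)]

theorem pvScan_mono (arr : List Int) (l : List (Int × Int)) (m : List Int) :
    pvGet0 m ≤ pvGet0 (l.foldl (pvStep arr) m) := by
  induction l generalizing m with
  | nil => exact le_refl _
  | cons x t ih =>
    exact le_trans (pvGet0_step_le arr m x) (ih (pvStep arr m x))

theorem pvScan_visited (arr : List Int) (l : List (Int × Int)) (m : List Int)
    (hm : 1 ≤ m.length) (pq : Int × Int) (hpq : pq ∈ l) :
    pvDiffAt arr pq ≤ pvGet0 (l.foldl (pvStep arr) m) := by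
  induction l generalizing m with
  | nil => simp at hpq
  | cons x t ih =>
    rcases List.mem_cons.1 hpq with h | h
    · subst h
      exact le_trans (pvDiff_le_step arr m hm pq) (pvScan_mono arr t _)
    · exact ih (pvStep arr m x) (by rw [pvStep_length]; exact hm) h

theorem pvScan_absorb (arr : List Int) (l2 : List (Int × Int)) (l1 : List (Int × Int))
    (m : List Int) (hm : 1 ≤ m.length) (hsub : ∀ x ∈ l2, x ∈ l1) :
    (l1 ++ l2).foldl (pvStep arr) m = l1.foldl (pvStep arr) m := by
  induction l2 generalizing l1 with
  | nil => simp
  | cons x t ih =>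
    have hx : x ∈ l1 := hsub x (List.mem_cons_self ..)
    have hstep : pvStep arr (l1.foldl (pvStep arr) m) x = l1.foldl (pvStep arr) m :=
      pvStep_noop arr _ x (pvScan_visited arr l1 m hm x hx)
    have h1 : (l1 ++ [x]).foldl (pvStep arr) m = l1.foldl (pvStep arr) m := by
      rw [List.foldl_append, List.foldl_cons, List.foldl_nil, hstep]
    have h2 := ih (l1 ++ [x]) (fun y hy => List.mem_append_left _ (hsub y (List.mem_cons_of_mem _ hy)))
    calc (l1 ++ x :: t).foldl (pvStep arr) m
        = ((l1 ++ [x]) ++ t).foldl (pvStep arr) m := by simp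
      _ = (l1 ++ [x]).foldl (pvStep arr) m := h2
      _ = l1.foldl (pvStep arr) m := h1

-- the distinct pairs A's recursion examines below level j, in its first-visit order (proof device)
def pvPairs (n : Int) (j : Int) : List (Int × Int) :=
  if j + 1 < n then
    (j, j + 1) :: pvPairs n (j + 1) ++ (PySem.List.pyRange (j + 2) n 1).map (fun b => (j, b))
  else []
termination_by (n - j).toNat
decreasing_by all_goals omega

theorem pvPairs_nil (n j : Int) (h : ¬ j + 1 < n) : pvPairs n j = [] := by
  rw [pvPairs, if_neg h]

-- specialization of List.foldl_attach to A's child loop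
theorem pvAttach (arr : List Int) (j : Int) (l : List Int) (b : List Int) :
    (l.attach).foldl (fun m k => max_arr_diff arr j (k.1 + 1) m) b
      = l.foldl (fun m k => max_arr_diff arr j (k + 1) m) b :=
  @List.foldl_attach Int (List Int) l (fun m k => max_arr_diff arr j (k + 1) m) b

theorem pvPairs_subset (n : Int) (a b : Int) (hab : a ≤ b) :
    ∀ x ∈ pvPairs n b, x ∈ pvPairs n a := by
  intro x hx
  by_cases h : a = b
  · subst h; exact hx
  · have hab' : a + 1 ≤ b := by omega
    have ih := pvPairs_subset n (a + 1) b hab' x hx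
    by_cases h2 : a + 1 < n
    · rw [pvPairs, if_pos h2]
      exact List.mem_cons_of_mem _ (List.mem_append_left _ ih)
    · rw [pvPairs_nil n (a + 1) (by omega)] at ih
      simp at ih
termination_by (b - a).toNat
decreasing_by all_goals omega

theorem pvPairs_mem (n : Int) (j : Int) (x : Int × Int) :
    x ∈ pvPairs n j ↔ j ≤ x.1 ∧ x.1 < x.2 ∧ x.2 < n := by
  obtain ⟨p, q⟩ := x
  show (p, q) ∈ pvPairs n j ↔ j ≤ p ∧ p < q ∧ q < n
  by_cases h : j + 1 < n
  · rw [pvPairs, if_pos h]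
    have ih : (p, q) ∈ pvPairs n (j + 1) ↔ j + 1 ≤ p ∧ p < q ∧ q < n :=
      pvPairs_mem n (j + 1) (p, q)
    simp only [List.mem_cons, List.mem_append, List.mem_map, PySem.List.mem_pyRange_one,
      ih, Prod.mk.injEq]
    constructor
    · rintro ((⟨hp, hq⟩ | ⟨h1, h2, h3⟩) | ⟨b, ⟨hb1, hb2⟩, hbp, hbq⟩)
      · exact ⟨by omega, by omega, by omega⟩
      · exact ⟨by omega, h2, h3⟩
      · exact ⟨by omega, by omega, by omega⟩
    · rintro ⟨h1, h2, h3⟩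
      by_cases hp : p = j
      · by_cases hq : q = j + 1
        · exact Or.inl (Or.inl ⟨hp, hq⟩)
        · exact Or.inr ⟨q, ⟨by omega, h3⟩, hp.symm, rfl⟩
      · exact Or.inl (Or.inr ⟨by omega, h2, h3⟩)
  · rw [pvPairs_nil n j h]
    simp only [List.not_mem_nil, false_iff]
    rintro ⟨h1, h2, h3⟩
    omega
termination_by (n - j).toNat
decreasing_by all_goals omega

mutual

theorem pvA_eq_scan (arr : List Int) (i j : Int) (m : List Int)
    (hj : j ≠ (arr.length : Int)) (hm : 1 ≤ m.length) :
    max_arr_diff arr i j m =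
      ((if i ≠ j then [(i, j)] else []) ++ pvPairs (arr.length : Int) j).foldl (pvStep arr) m := by
  rw [max_arr_diff, if_neg hj, pvAttach]
  have hroot : (if i ≠ j then
      if PySem.List.pyGetD m 0 0 < PySem.List.pyGetD arr j 0 - PySem.List.pyGetD arr i 0 then
        ((m.set 0 (PySem.List.pyGetD arr j 0 - PySem.List.pyGetD arr i 0)).set 1 j).set 2 i
      else m
    else m) = (if i ≠ j then [(i, j)] else []).foldl (pvStep arr) m := by
    by_cases hij : i ≠ j
    · rw [if_pos hij, if_pos hij]; rfl
    · rw [if_neg hij, if_neg hij]; rfl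
  rw [hroot]
  by_cases hlt : j < (arr.length : Int)
  · by_cases hj1 : j + 1 = (arr.length : Int)
    · have hr : PySem.List.pyRange j (arr.length : Int) 1 = [j] := by
        rw [← hj1]; exact PySem.List.pyRange_one_singleton j
      rw [hr, pvPairs_nil _ _ (by omega)]
      simp only [List.foldl_cons, List.foldl_nil, List.append_nil]
      rw [max_arr_diff, if_pos hj1]
    · have hj1' : j + 1 < (arr.length : Int) := by omega
      rw [PySem.List.pyRange_one_cons hlt]
      simp only [List.foldl_cons]
      have hm' : 1 ≤ ((if i ≠ j then [(i, j)] else []).foldl (pvStep arr) m).length := by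
        rw [pvScan_length]; exact hm
      rw [pvA_eq_scan arr j (j + 1) _ (by omega) hm']
      have hrootj : (if j ≠ j + 1 then [(j, j + 1)] else []) = [(j, j + 1)] := by
        rw [if_pos (by omega)]
      rw [hrootj, ← List.foldl_append]
      rw [pvChain arr j m hm (j + 1) (by omega) hlt
        ((if i ≠ j then [(i, j)] else []) ++ ([(j, j + 1)] ++ pvPairs (arr.length : Int) (j + 1)))
        (fun x hx => List.mem_append_right _ (List.mem_append_right _ hx))]
      conv_rhs => rw [pvPairs]
      rw [if_pos hj1']
      simp only [List.append_assoc, List.cons_append, List.nil_append]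
      rw [show j + 1 + 1 = j + 2 from by ring]
  · have hr : PySem.List.pyRange j (arr.length : Int) 1 = [] :=
      PySem.List.pyRange_one_eq_nil (by omega)
    rw [hr, pvPairs_nil _ _ (by omega)]
    simp
termination_by ((arr.length : Int) - j).toNat
decreasing_by all_goals omega

-- the tail of A's child loop, folded from an accumulator that has already processed P
theorem pvChain (arr : List Int) (j : Int) (m : List Int) (hm : 1 ≤ m.length)
    (a : Int) (ha : j < a) (hj : j < (arr.length : Int))
    (P : List (Int × Int)) (hsub : ∀ x ∈ pvPairs (arr.length : Int) a, x ∈ P) :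
    (PySem.List.pyRange a (arr.length : Int) 1).foldl
        (fun acc k => max_arr_diff arr j (k + 1) acc) (P.foldl (pvStep arr) m)
      = (P ++ (PySem.List.pyRange (a + 1) (arr.length : Int) 1).map (fun b => (j, b))).foldl
          (pvStep arr) m := by
  by_cases hlt : a < (arr.length : Int)
  · rw [PySem.List.pyRange_one_cons hlt]
    simp only [List.foldl_cons]
    by_cases ha1 : a + 1 = (arr.length : Int)
    · have hr : PySem.List.pyRange (a + 1) (arr.length : Int) 1 = [] :=
        PySem.List.pyRange_one_eq_nil (by omega)
      rw [hr]
      simp only [List.map_nil, List.append_nil, List.foldl_nil]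
      rw [max_arr_diff, if_pos ha1]
    · have ha1' : a + 1 < (arr.length : Int) := by omega
      have hmP : 1 ≤ (P.foldl (pvStep arr) m).length := by rw [pvScan_length]; exact hm
      rw [pvA_eq_scan arr j (a + 1) _ (by omega) hmP]
      rw [if_pos (by omega : j ≠ a + 1), ← List.foldl_append]
      rw [← List.append_assoc]
      rw [pvScan_absorb arr (pvPairs (arr.length : Int) (a + 1)) (P ++ [(j, a + 1)]) m hm
        (fun x hx => List.mem_append_left _ (hsub x (pvPairs_subset _ a (a + 1) (by omega) x hx)))]
      rw [pvChain arr j m hm (a + 1) (by omega) hj (P ++ [(j, a + 1)])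
        (fun x hx => List.mem_append_left _ (hsub x (pvPairs_subset _ a (a + 1) (by omega) x hx)))]
      rw [PySem.List.pyRange_one_cons ha1']
      simp [List.append_assoc]
  · rw [PySem.List.pyRange_one_eq_nil (by omega),
      PySem.List.pyRange_one_eq_nil (by omega : (arr.length : Int) ≤ a + 1)]
    simp
termination_by ((arr.length : Int) - a).toNat
decreasing_by all_goals omega

end

-- B's nested loops are the fold of pvStep over the spec pair list
theorem pvFoldl_flatMap {α β γ : Type} (l : List α) (f : α → List β) (g : γ → β → γ) (b : γ) :
    (l.flatMap f).foldl g b = l.foldl (fun acc a => (f a).foldl g acc) b := by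
  induction l generalizing b with
  | nil => rfl
  | cons x t ih => simp [List.flatMap_cons, List.foldl_append, ih]

theorem pvB_eq_scan (arr : List Int) (i j : Int) (m : List Int)
    (hj : j ≠ (arr.length : Int)) :
    max_arr_diff_alt arr i j m = (pvPairsSpec arr i j).foldl (pvStep arr) m := by
  rw [max_arr_diff_alt, if_neg hj, pvPairsSpec, List.foldl_append, pvFoldl_flatMap]
  have hroot : (if i ≠ j ∧ PySem.List.pyGetD m 0 0 < PySem.List.pyGetD arr j 0 - PySem.List.pyGetD arr i 0 then
      ((m.set 0 (PySem.List.pyGetD arr j 0 - PySem.List.pyGetD arr i 0)).set 1 j).set 2 i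
    else m) = (if i ≠ j then [(i, j)] else []).foldl (pvStep arr) m := by
    by_cases hij : i ≠ j
    · rw [if_pos hij]
      simp only [List.foldl_cons, List.foldl_nil]
      rw [pvStep_eq]
      by_cases hcmp : pvGet0 m < pvDiffAt arr (i, j)
      · rw [if_pos ⟨hij, hcmp⟩, if_pos hcmp]; rfl
      · rw [if_neg (fun h => hcmp h.2), if_neg hcmp]
    · rw [if_neg hij, if_neg (fun h => hij h.1)]; rfl
  rw [hroot]
  simp only [List.foldl_map]
  rfl

theorem pvPairsSpec_mem (arr : List Int) (i j : Int) (x : Int × Int) :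
    x ∈ pvPairsSpec arr i j ↔
      (i ≠ j ∧ x = (i, j)) ∨ (j ≤ x.1 ∧ x.1 < x.2 ∧ x.2 < (arr.length : Int)) := by
  simp only [pvPairsSpec, List.mem_append, List.mem_flatMap, List.mem_map,
    PySem.List.mem_pyRange_one]
  constructor
  · rintro (h | ⟨p, hp, q, hq, rfl⟩)
    · by_cases hij : i ≠ j
      · rw [if_pos hij] at h; simp at h; exact Or.inl ⟨hij, h⟩
      · rw [if_neg hij] at h; simp at h
    · exact Or.inr ⟨hp.1, by simpa using hq.1, by simpa using hq.2⟩
  · rintro (⟨hij, rfl⟩ | ⟨h1, h2, h3⟩)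
    · left; rw [if_pos hij]; simp
    · right; exact ⟨x.1, ⟨h1, by omega⟩, x.2, ⟨by omega, by simpa using h3⟩,
        by rcases x with ⟨p, q⟩; rfl⟩

theorem pvA_mem_iff (arr : List Int) (i j : Int) (x : Int × Int) :
    x ∈ (if i ≠ j then [(i, j)] else []) ++ pvPairs (arr.length : Int) j ↔
      x ∈ pvPairsSpec arr i j := by
  rw [pvPairsSpec_mem]
  simp only [List.mem_append, pvPairs_mem]
  constructor
  · rintro (h | h)
    · by_cases hij : i ≠ j
      · rw [if_pos hij] at h; simp at h; exact Or.inl ⟨hij, h⟩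
      · rw [if_neg hij] at h; simp at h
    · exact Or.inr h
  · rintro (⟨hij, rfl⟩ | h)
    · left; rw [if_pos hij]; simp
    · right; exact h

theorem pvScan_nofire (arr : List Int) (l : List (Int × Int)) (m : List Int)
    (h : ∀ x ∈ l, pvDiffAt arr x ≤ pvGet0 m) : l.foldl (pvStep arr) m = m := by
  induction l with
  | nil => rfl
  | cons x t ih =>
    rw [List.foldl_cons, pvStep_noop arr m x (h x (List.mem_cons_self ..))]
    exact ih (fun z hz => h z (List.mem_cons_of_mem _ hz))

theorem pvExists_max (l : List (Int × Int)) (f : Int × Int → Int) (hne : l ≠ []) :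
    ∃ x ∈ l, ∀ y ∈ l, f y ≤ f x := by
  induction l with
  | nil => exact absurd rfl hne
  | cons a t ih =>
    rcases t with _ | ⟨b, t'⟩
    · exact ⟨a, List.mem_cons_self .., by rintro y hy; simp at hy; subst hy; exact le_refl _⟩
    · obtain ⟨x, hx, hmax⟩ := ih (by simp)
      by_cases hc : f a ≤ f x
      · exact ⟨x, List.mem_cons_of_mem _ hx, by
          rintro y hy
          rcases List.mem_cons.1 hy with rfl | hy
          · exact hc
          · exact hmax y hy⟩
      · exact ⟨a, List.mem_cons_self .., by
          rintro y hy
          rcases List.mem_cons.1 hy with rfl | hy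
          · exact le_refl _
          · exact le_trans (hmax y hy) (by omega)⟩

-- the value of the scan when one pair uniquely attains the maximum above the initial max[0]
theorem pvScan_char (arr : List Int) (l : List (Int × Int)) (p q : Int)
    (m0 m1 m2 : Int) (mt : List Int)
    (hmem : (p, q) ∈ l)
    (hmax : ∀ z ∈ l, pvDiffAt arr z ≤ pvDiffAt arr (p, q))
    (huniq : ∀ z ∈ l, pvDiffAt arr z = pvDiffAt arr (p, q) → z = (p, q))
    (hfire : m0 < pvDiffAt arr (p, q)) :
    l.foldl (pvStep arr) (m0 :: m1 :: m2 :: mt) = pvDiffAt arr (p, q) :: q :: p :: mt := by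
  induction l generalizing m0 m1 m2 with
  | nil => simp at hmem
  | cons x t ih =>
    rw [List.foldl_cons]
    by_cases hx : x = (p, q)
    · subst hx
      have hg0 : pvGet0 (m0 :: m1 :: m2 :: mt) = m0 := by
        simp [pvGet0, PySem.List.pyGetD_zero]
      rw [pvStep_eq, hg0, if_pos hfire]
      have hset : (((m0 :: m1 :: m2 :: mt).set 0 (pvDiffAt arr (p, q))).set 1 (p, q).2).set 2 (p, q).1
          = pvDiffAt arr (p, q) :: q :: p :: mt := rfl
      rw [hset]
      exact pvScan_nofire arr t _ (by
        intro z hz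
        rw [show pvGet0 (pvDiffAt arr (p, q) :: q :: p :: mt) = pvDiffAt arr (p, q) from by
          simp [pvGet0, PySem.List.pyGetD_zero]]
        exact hmax z (List.mem_cons_of_mem _ hz))
    · have hmem' : (p, q) ∈ t := by
        rcases List.mem_cons.1 hmem with h | h
        · exact absurd h.symm hx
        · exact h
      have hlt : pvDiffAt arr x < pvDiffAt arr (p, q) := by
        have h1 := hmax x (List.mem_cons_self ..)
        have h2 : pvDiffAt arr x ≠ pvDiffAt arr (p, q) := fun h =>
          hx (huniq x (List.mem_cons_self ..) h)
        omega
      have hg0 : pvGet0 (m0 :: m1 :: m2 :: mt) = m0 := by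
        simp [pvGet0, PySem.List.pyGetD_zero]
      rw [pvStep_eq, hg0]
      by_cases hc : m0 < pvDiffAt arr x
      · rw [if_pos hc]
        have hset : (((m0 :: m1 :: m2 :: mt).set 0 (pvDiffAt arr x)).set 1 x.2).set 2 x.1
            = pvDiffAt arr x :: x.2 :: x.1 :: mt := rfl
        rw [hset]
        exact ih (pvDiffAt arr x) x.2 x.1 hmem'
          (fun z hz => hmax z (List.mem_cons_of_mem _ hz))
          (fun z hz h => huniq z (List.mem_cons_of_mem _ hz) h) hlt
      · rw [if_neg hc]
        exact ih m0 m1 m2 hmem'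
          (fun z hz => hmax z (List.mem_cons_of_mem _ hz))
          (fun z hz h => huniq z (List.mem_cons_of_mem _ hz) h) hfire

-- ===== VERDICT (by name: the statement is the Claim_ definition above) =====
theorem max_arr_diff_spec : Claim_equal_max_arr_diff := by
  intro arr i j m _ hpre
  show max_arr_diff arr i j m = max_arr_diff_alt arr i j m
  by_cases hj : j = (arr.length : Int)
  · rw [max_arr_diff, if_pos hj, max_arr_diff_alt, if_pos hj]
  · rcases hpre with hpre | ⟨hij, hj1⟩ | ⟨hjl, hjr, hi, hmne, hfire⟩
    · exact absurd hpre hj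
    · -- i = j and no pair below j exists: both programs return m untouched
      subst hij
      rw [max_arr_diff, if_neg hj, pvAttach, if_neg (by simp), max_arr_diff_alt, if_neg hj,
        if_neg (by simp)]
      by_cases hjlt : i < (arr.length : Int)
      · have hjeq : i + 1 = (arr.length : Int) := by omega
        rw [show PySem.List.pyRange i (arr.length : Int) 1 = [i] by
          rw [← hjeq]; exact PySem.List.pyRange_one_singleton i]
        simp only [List.foldl_cons, List.foldl_nil]
        rw [max_arr_diff, if_pos hjeq,
          PySem.List.pyRange_one_eq_nil (le_of_eq hjeq.symm : (arr.length : Int) ≤ i + 1),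
          List.foldl_nil]
      · rw [PySem.List.pyRange_one_eq_nil (by omega : (arr.length : Int) ≤ i)]
        simp
    · -- the main case: both programs are the pvStep-scan of their pair lists
      have hm1 : 1 ≤ m.length := by cases m with
        | nil => exact absurd rfl hmne
        | cons a t => simp
      rw [pvA_eq_scan arr i j m hj hm1, pvB_eq_scan arr i j m hj]
      by_cases hf : ∃ x ∈ pvPairsSpec arr i j, PySem.List.pyGetD m 0 0 < pvDiffAt arr x
      · obtain ⟨hlen, huq⟩ := hfire hf
        obtain ⟨m0, m1, m2, mt, rfl⟩ : ∃ m0 m1 m2 mt, m = m0 :: m1 :: m2 :: mt := by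
          rcases m with _ | ⟨a, _ | ⟨b, _ | ⟨c, t⟩⟩⟩
          · simp at hlen
          · simp at hlen
          · simp at hlen
          · exact ⟨a, b, c, t, rfl⟩
        obtain ⟨x0, hx0m, hx0⟩ := hf
        have hne : pvPairsSpec arr i j ≠ [] := by
          intro h; rw [h] at hx0m; simp at hx0m
        obtain ⟨xs, hxsm, hxsmax⟩ := pvExists_max (pvPairsSpec arr i j) (pvDiffAt arr) hne
        have hfire' : m0 < pvDiffAt arr xs := by
          have : PySem.List.pyGetD (m0 :: m1 :: m2 :: mt) 0 0 = m0 := by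
            simp [PySem.List.pyGetD_zero]
          rw [this] at hx0
          exact lt_of_lt_of_le hx0 (hxsmax x0 hx0m)
        have huniq : ∀ z ∈ pvPairsSpec arr i j,
            pvDiffAt arr z = pvDiffAt arr xs → z = xs := by
          intro z hz hzeq
          exact huq z hz xs hxsm
            (fun w hw => hzeq ▸ hxsmax w hw) hxsmax
        rcases xs with ⟨p, q⟩
        rw [pvScan_char arr _ p q m0 m1 m2 mt
          ((pvA_mem_iff arr i j (p, q)).2 hxsm)
          (fun z hz => hxsmax z ((pvA_mem_iff arr i j z).1 hz))
          (fun z hz h => huniq z ((pvA_mem_iff arr i j z).1 hz) h) hfire']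
        rw [pvScan_char arr _ p q m0 m1 m2 mt hxsm hxsmax huniq hfire']
      · -- nothing fires: both scans leave m unchanged
        push Not at hf
        rw [pvScan_nofire arr _ _ (fun z hz => hf z ((pvA_mem_iff arr i j z).1 hz)),
          pvScan_nofire arr _ _ hf]
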